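-- pv_equiv track=rewrite | github.com/DragonlordNewb/sxl | sxlpy/utils.py | all_index_combos
-- ===== SOURCE A (Python) =====
-- from typing import Iterable
--
-- def all_index_combos(r: int, d: int) -> Iterable[list[int]]:
-- 	if r == 1:
-- 		for i in range(d):
-- 			yield [i]
-- 	else:
-- 		for i in range(d):
-- 			for x in all_index_combos(r - 1, d):
-- 				yield [i] + x
-- ===== SOURCE B (Python) =====
-- def all_index_combos(r: int, d: int):
--     # Counting formulation: enumerate n in range(d**r) and decode n into its
--     # r base-d digits (most significant first). Same lexicographic order as A.
--     if d <= 0: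
--         return
--     for n in range(d ** r):
--         digits = []
--         for _ in range(r):
--             n, rem = divmod(n, d)
--             digits.append(rem)
--         yield digits[::-1]
-- ===== Notes on version B (the rewrite author's own statement) =====
-- stated objective: alternative
-- what changed: Replaces A's head recursion (for i in range(d): recurse on r-1) by a flat counting pass: enumerate n in range(d**r) and decode each n into its r base-d digits, most significant first.
import Mathlib
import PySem

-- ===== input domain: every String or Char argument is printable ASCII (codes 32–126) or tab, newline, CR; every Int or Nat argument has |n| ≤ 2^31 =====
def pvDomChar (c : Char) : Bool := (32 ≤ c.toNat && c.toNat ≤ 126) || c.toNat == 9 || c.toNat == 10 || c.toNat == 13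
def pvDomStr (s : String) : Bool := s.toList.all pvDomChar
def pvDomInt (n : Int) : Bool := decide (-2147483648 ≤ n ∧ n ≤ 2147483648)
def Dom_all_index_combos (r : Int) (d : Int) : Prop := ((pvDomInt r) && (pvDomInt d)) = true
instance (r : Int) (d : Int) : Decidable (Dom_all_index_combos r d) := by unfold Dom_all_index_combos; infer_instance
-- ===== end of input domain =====

-- B replaces A's head recursion by enumerating n in range(d**r) and decoding n into its r
-- base-d digits (an arithmetic counting pass); equal return sequence on Pre_ (r ≥ 1 or d ≤ 0).

-- ===== PORT A =====
-- Literal port of the recursive generator, materialised as the list of yielded values.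
-- The 'else if r ≤ 1 then []' branch is only a totality guard: there Python either yields
-- nothing (d ≤ 0 : range(d) is empty, matching []) or diverges (d ≥ 1, excluded by Pre_).
def all_index_combos (r : Int) (d : Int) : List (List Int) :=
  if r == 1 then
    (PySem.List.pyRange 0 d 1).map (fun i => [i])
  else if r ≤ 1 then []
  else
    (PySem.List.pyRange 0 d 1).flatMap (fun i =>
      (all_index_combos (r - 1) d).map (fun x => [i] ++ x))
termination_by r.toNat
decreasing_by
  rename_i h1 h2
  simp only [beq_iff_eq] at h1
  omega

-- ===== PORT B =====
-- inner loop of Source B: 'for _ in range(r): n, rem = divmod(n, d); digits.append(rem)',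
-- followed by 'digits[::-1]'
def pvDecode : Nat → Int → Int → List Int → List Int
  | 0, _, _, digits => digits.reverse
  | f + 1, d, n, digits =>
      pvDecode f d (PySem.Int.floordiv n d) (digits ++ [PySem.Int.mod n d])

def all_index_combos_alt (r : Int) (d : Int) : List (List Int) :=
  if d ≤ 0 then []
  else (PySem.List.pyRange 0 (d ^ r.toNat) 1).map (fun n => pvDecode r.toNat d n [])

-- ===== PRECONDITION & SPEC =====
-- Pre_ excludes exactly r ≤ 0 with d ≥ 1, where Python A raises RecursionError
-- (the generator recurses on r-1 forever); everywhere else A returns normally.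
def Pre_all_index_combos (r : Int) (d : Int) : Prop := 1 ≤ r ∨ d ≤ 0
instance (r : Int) (d : Int) : Decidable (Pre_all_index_combos r d) := by
  unfold Pre_all_index_combos; infer_instance

def pvWitness_all_index_combos : Int × Int := (2, 3)

def Spec_all_index_combos (r : Int) (d : Int) (out : List (List Int)) : Prop := out = all_index_combos_alt r d
instance (r : Int) (d : Int) (out : List (List Int)) : Decidable (Spec_all_index_combos r d out) := by unfold Spec_all_index_combos; infer_instance

-- ===== CLAIM (what is proved, stated in full; the proofs are below) =====
def Claim_equal_all_index_combos : Prop := ∀ (r : Int) (d : Int), Dom_all_index_combos r d → Pre_all_index_combos r d → Spec_all_index_combos r d (all_index_combos r d)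

-- ===== LEMMAS AND PROOFS =====

-- proof-only helper: the least-significant-first digit stream pvDecode accumulates
def pvDigits : Nat → Int → Int → List Int
  | 0, _, _ => []
  | f + 1, d, n => PySem.Int.mod n d :: pvDigits f d (PySem.Int.floordiv n d)

theorem pvDecode_eq (f : Nat) (d : Int) :
    ∀ (n : Int) (acc : List Int), pvDecode f d n acc = (acc ++ pvDigits f d n).reverse := by
  induction f with
  | zero => intro n acc; simp [pvDecode, pvDigits]
  | succ f ih => intro n acc; simp [pvDecode, pvDigits, ih]

theorem pvDigits_split (d : Int) (hd : 0 < d) :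
    ∀ (k : Nat) (i j : Int), 0 ≤ i → i < d → 0 ≤ j → j < d ^ k →
      pvDigits (k + 1) d (i * d ^ k + j) = pvDigits k d j ++ [i] := by
  intro k
  induction k with
  | zero =>
    intro i j hi0 hid hj0 hj1
    have hj : j = 0 := by simp at hj1; omega
    subst hj
    simp [pvDigits, PySem.Int.mod_eq_emod_of_pos hd, Int.emod_eq_of_lt hi0 hid]
  | succ k ih =>
    intro i j hi0 hid hj0 hj1
    have hmod : PySem.Int.mod (i * d ^ (k + 1) + j) d = PySem.Int.mod j d := by
      rw [PySem.Int.mod_eq_emod_of_pos hd, PySem.Int.mod_eq_emod_of_pos hd]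
      have : i * d ^ (k + 1) + j = j + d * (i * d ^ k) := by ring
      rw [this, Int.add_mul_emod_self_left]
    have hdiv : PySem.Int.floordiv (i * d ^ (k + 1) + j) d = i * d ^ k + PySem.Int.floordiv j d := by
      rw [PySem.Int.floordiv_eq_ediv_of_pos hd, PySem.Int.floordiv_eq_ediv_of_pos hd]
      have : i * d ^ (k + 1) + j = j + i * d ^ k * d := by ring
      rw [this, Int.add_mul_ediv_right _ _ (by omega : d ≠ 0), Int.add_comm]
    show PySem.Int.mod _ d :: pvDigits (k + 1) d _ = (PySem.Int.mod j d :: pvDigits k d _) ++ [i]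
    rw [hmod, hdiv]
    have hjq0 : 0 ≤ PySem.Int.floordiv j d := by
      rw [PySem.Int.floordiv_eq_ediv_of_pos hd]; exact Int.ediv_nonneg hj0 (le_of_lt hd)
    have hjq1 : PySem.Int.floordiv j d < d ^ k := by
      rw [PySem.Int.floordiv_lt_iff_lt_mul hd]
      calc j < d ^ (k + 1) := hj1
        _ = d ^ k * d := by ring
    rw [ih i (PySem.Int.floordiv j d) hi0 hid hjq0 hjq1]
    simp

-- range (a*b) split into blocks of size b
theorem range_mul_flatMap (f : Nat → List Int) :
    ∀ (a b : Nat), (List.range (a * b)).map f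
      = (List.range a).flatMap (fun i => (List.range b).map (fun j => f (i * b + j))) := by
  intro a
  induction a with
  | zero => intro b; simp
  | succ a ih =>
    intro b
    have h1 : (a + 1) * b = a * b + b := by ring
    rw [h1, List.range_add, List.range_succ]
    simp [ih, List.map_map, Function.comp_def, Nat.add_comm (a * b)]

theorem A_char (D : Nat) (hD : 1 ≤ D) :
    ∀ k : Nat, all_index_combos ((k : Nat) + 1 : Int) (D : Int)
      = (List.range (D ^ (k + 1))).map (fun n : Nat => (pvDigits (k + 1) (D : Int) (n : Int)).reverse) := by
  intro k
  induction k with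
  | zero =>
    rw [all_index_combos]
    simp only [if_pos (by simp : ((0 : Nat) + 1 : Int) == 1)]
    rw [PySem.List.pyRange_one]
    simp only [sub_zero, Int.toNat_natCast, Nat.zero_add, pow_one, List.map_map]
    apply List.map_congr_left
    intro n hn
    have hn' : (n : Int) < (D : Int) := by exact_mod_cast List.mem_range.mp hn
    simp [pvDigits, PySem.Int.mod_eq_emod_of_pos (by exact_mod_cast hD : (0:Int) < D),
      Int.emod_eq_of_lt (by positivity) hn']
  | succ k ih =>
    rw [all_index_combos]
    have hne : ¬ (((k : Nat) + 1 + 1 : Int) == 1) = true := by simp; omega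
    rw [if_neg (by simp at hne ⊢; omega), if_neg (by omega)]
    have hstep : ((k : Nat) + 1 + 1 : Int) - 1 = ((k : Nat) + 1 : Int) := by ring
    push_cast
    rw [hstep, ih, PySem.List.pyRange_one]
    simp only [sub_zero, Int.toNat_natCast]
    have hpow : D ^ (k + 1 + 1) = D * D ^ (k + 1) := by ring
    rw [hpow, range_mul_flatMap]
    rw [List.flatMap_map]
    apply List.flatMap_congr
    intro i hi
    have hi' : (i : Int) < (D : Int) := by exact_mod_cast List.mem_range.mp hi
    rw [List.map_map]
    apply List.map_congr_left
    intro j hj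
    have hj' : (j : Int) < (D : Int) ^ (k + 1) := by
      have := List.mem_range.mp hj
      exact_mod_cast this
    simp only [Function.comp_def, zero_add]
    have hcast : ((i * D ^ (k + 1) + j : Nat) : Int) = (i : Int) * (D : Int) ^ (k + 1) + (j : Int) := by
      push_cast; ring
    rw [hcast, pvDigits_split (D : Int) (by exact_mod_cast hD) (k + 1) (i : Int) (j : Int)
      (by positivity) hi' (by positivity) hj']
    simp

theorem A_nil_of_nonpos (r d : Int) (hd : d ≤ 0) : all_index_combos r d = [] := by
  rw [all_index_combos]
  rw [PySem.List.pyRange_one_eq_nil (by omega)]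
  split_ifs <;> simp

-- ===== VERDICT (by name: the statement is the Claim_ definition above) =====
theorem all_index_combos_spec : Claim_equal_all_index_combos := by
  intro r d _ hpre
  unfold Spec_all_index_combos all_index_combos_alt
  by_cases hd : d ≤ 0
  · rw [if_pos hd, A_nil_of_nonpos r d hd]
  · rw [if_neg hd]
    replace hd : 0 < d := by omega
    have hr : 1 ≤ r := by rcases hpre with h | h; exact h; omega
    obtain ⟨k, hk⟩ : ∃ k : Nat, r = (k : Nat) + 1 := ⟨(r - 1).toNat, by omega⟩
    obtain ⟨D, hDD⟩ : ∃ D : Nat, d = (D : Int) := ⟨d.toNat, by omega⟩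
    have hD : 1 ≤ D := by omega
    subst hk hDD
    rw [A_char D hD k]
    have htn : (((k : Nat) + 1 : Int)).toNat = k + 1 := by omega
    rw [htn, PySem.List.pyRange_one]
    have hp : (((D : Int) ^ (k + 1) - 0)).toNat = D ^ (k + 1) := by
      rw [sub_zero, ← Nat.cast_pow, Int.toNat_natCast]
    rw [hp, List.map_map]
    apply List.map_congr_left
    intro n _
    simp [pvDecode_eq]
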